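-- pv_equiv track=rewrite | github.com/owtotwo/Warehouse | matrix.py | zero_below
-- ===== SOURCE A (Python) =====
-- def is_all_zero(s):
--     #list-------->bool
--     #use to judge if it is all zero
--     for i in s:
--         if i!=0:
--             return False
--     return True
--
-- def zero_below(ss):
--     #sink the all-zero row
--     #return the new zero below matrix
--     tail = []
--     i = 0
--     while i<len(ss):
--         if is_all_zero(ss[i]):
--             tail.append(ss[i])
--             del ss[i]
--         else:
--             i += 1
--     ss += tail
--     return ss
-- ===== SOURCE B (Python) =====
-- def zero_below(ss):
--     # sink the all-zero rows: stable in-place sort on a boolean key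
--     # (False = has a non-zero entry, sorts first; True = all-zero, sinks)
--     ss.sort(key=lambda row: all(x == 0 for x in row))
--     return ss
-- ===== Notes on version B (the rewrite author's own statement) =====
-- stated objective: simpler
-- what changed: Replaced the manual while-loop that deletes all-zero rows by index and re-appends them with a single stable in-place sort keyed on the boolean 'row is all zero', relying on sort stability to preserve order within each group.
import Mathlib
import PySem

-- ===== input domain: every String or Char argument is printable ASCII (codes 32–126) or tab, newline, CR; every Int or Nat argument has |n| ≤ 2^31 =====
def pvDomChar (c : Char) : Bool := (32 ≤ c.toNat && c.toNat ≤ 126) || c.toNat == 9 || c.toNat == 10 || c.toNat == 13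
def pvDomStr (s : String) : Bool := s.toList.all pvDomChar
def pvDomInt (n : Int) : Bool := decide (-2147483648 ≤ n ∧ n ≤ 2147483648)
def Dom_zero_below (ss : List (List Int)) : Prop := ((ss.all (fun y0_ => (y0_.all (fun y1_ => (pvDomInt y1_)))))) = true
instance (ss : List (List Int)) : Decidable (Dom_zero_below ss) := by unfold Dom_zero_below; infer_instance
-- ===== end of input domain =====

-- B replaces A's index-deleting while loop by one stable in-place sort on the
-- boolean key "row is all zero" (simpler; both mutate ss in place, return value proved equal).


-- ===== PORT A =====
-- helper is_all_zero: Python's early-return loop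
def is_all_zero : List Int → Bool
  | [] => true
  | i :: s => if i ≠ 0 then false else is_all_zero s

-- the while loop of zero_below: state (ss, i, tail); `del ss[i]` is eraseIdx
def zbLoop (ss : List (List Int)) (i : Nat) (tail : List (List Int)) : List (List Int) :=
  if h : i < ss.length then
    if is_all_zero ss[i] then
      zbLoop (ss.eraseIdx i) i (tail ++ [ss[i]])
    else
      zbLoop ss (i + 1) tail
  else
    ss ++ tail
termination_by ss.length - i
decreasing_by
  · have := List.length_eraseIdx_of_lt h; omega
  · omega

def zero_below (ss : List (List Int)) : List (List Int) := zbLoop ss 0 []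

-- ===== PORT B =====
-- ss.sort(key=lambda row: all(x == 0 for x in row)); return ss
def zero_below_alt (ss : List (List Int)) : List (List Int) :=
  PySem.List.sorted ss (fun row => row.all (fun x => x == 0)) false

-- ===== PRECONDITION & SPEC =====
def Spec_zero_below (ss : List (List Int)) (out : List (List Int)) : Prop := out = zero_below_alt ss
instance (ss : List (List Int)) (out : List (List Int)) : Decidable (Spec_zero_below ss out) := by unfold Spec_zero_below; infer_instance

-- ===== CLAIM (what is proved, stated in full; the proofs are below) =====
def Claim_equal_zero_below : Prop := ∀ (ss : List (List Int)), Dom_zero_below ss → Spec_zero_below ss (zero_below ss)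

-- ===== LEMMAS AND PROOFS =====

def zkey (row : List Int) : Bool := row.all (fun x => x == 0)

theorem is_all_zero_eq_zkey (s : List Int) : is_all_zero s = zkey s := by
  induction s with
  | nil => rfl
  | cons i s ih =>
      by_cases h : i = 0
      · simp [is_all_zero, zkey, h]; simpa [zkey] using ih
      · simp [is_all_zero, zkey, h]

-- A's loop computes: nonzero rows (prefix kept so far + rest filtered), then tail, then zero rows of the rest
theorem zbLoop_eq (ss : List (List Int)) (i : Nat) (tail : List (List Int))
    (h : ∀ r ∈ ss.take i, zkey r = false) :
    zbLoop ss i tail =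
      ss.filter (fun r => !zkey r) ++ tail ++ (ss.drop i).filter (fun r => zkey r) := by
  rw [zbLoop]
  by_cases hlt : i < ss.length
  · have hdecomp : ss.drop i = ss[i] :: ss.drop (i + 1) := (List.getElem_cons_drop hlt).symm
    have htd : ss = ss.take i ++ ss.drop i := (List.take_append_drop i ss).symm
    have hlen : (ss.take i).length = i := by simp [Nat.le_of_lt hlt]
    have hfz : (ss.take i).filter (fun r => zkey r) = [] := by
      simp only [List.filter_eq_nil_iff]
      intro r hr; simp [h r hr]
    have hfn : (ss.take i).filter (fun r => !zkey r) = ss.take i := by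
      simp only [List.filter_eq_self]
      intro r hr; simp [h r hr]
    by_cases hz : is_all_zero ss[i] = true
    · have hzk : zkey ss[i] = true := by rwa [is_all_zero_eq_zkey] at hz
      simp only [hlt, hz, dif_pos, if_pos]
      have herase : ss.eraseIdx i = ss.take i ++ ss.drop (i + 1) :=
        List.eraseIdx_eq_take_drop_succ ss i
      have hrec := zbLoop_eq (ss.eraseIdx i) i (tail ++ [ss[i]]) (by
        intro r hr
        apply h
        rw [herase, List.take_append_of_le_length (by omega), List.take_take,
          Nat.min_self] at hr
        simpa using hr)
      rw [hrec, herase]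
      have hdrop : (ss.take i ++ ss.drop (i + 1)).drop i = ss.drop (i + 1) := by
        rw [List.drop_append_of_le_length (by omega),
          List.drop_eq_nil_of_le (le_of_eq hlen), List.nil_append]
      have hRn : ss.filter (fun r => !zkey r)
          = ss.take i ++ (ss.drop (i + 1)).filter (fun r => !zkey r) := by
        conv_lhs => rw [htd, hdecomp]
        rw [List.filter_append, hfn, List.filter_cons, if_neg (by simp [hzk])]
      have hRz : (ss.drop i).filter (fun r => zkey r)
          = ss[i] :: (ss.drop (i + 1)).filter (fun r => zkey r) := by
        rw [hdecomp, List.filter_cons, if_pos (by simp [hzk])]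
      rw [hdrop, hRn, hRz, List.filter_append, hfn]
      simp [List.append_assoc]
    · have hzk : zkey ss[i] = false := by
        rw [is_all_zero_eq_zkey] at hz; simpa using hz
      simp only [hlt, hz, dif_pos, if_neg, Bool.not_eq_true]
      have hrec := zbLoop_eq ss (i + 1) tail (by
        intro r hr
        rcases List.mem_take_iff_getElem.mp hr with ⟨j, hj, rfl⟩
        by_cases hji : j < i
        · exact h _ (List.mem_take_iff_getElem.mpr ⟨j, by omega, rfl⟩)
        · have : j = i := by omega
          subst this; exact hzk)
      rw [hrec]
      have hsame : (ss.drop i).filter (fun r => zkey r)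
          = (ss.drop (i + 1)).filter (fun r => zkey r) := by
        rw [hdecomp, List.filter_cons, if_neg (by simp [hzk])]
      rw [hsame]
  · simp only [hlt, dif_neg, not_false_iff]
    have hall : ∀ r ∈ ss, zkey r = false := by
      intro r hr
      apply h
      rwa [List.take_of_length_le (by omega)]
    have h1 : ss.filter (fun r => !zkey r) = ss := by
      simp only [List.filter_eq_self]; intro r hr; simp [hall r hr]
    have h2 : (ss.drop i).filter (fun r => zkey r) = [] := by
      simp only [List.filter_eq_nil_iff]
      intro r hr; simp [hall r (List.mem_of_mem_drop hr)]
    rw [h1, h2, List.append_nil]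
termination_by ss.length - i
decreasing_by
  all_goals (have := List.length_eraseIdx_of_lt hlt; omega)

-- inserting past every element when the comparison never fires
theorem insertBy_all_not (x : List Int) (l : List (List Int))
    (h : ∀ y ∈ l, decide (zkey x < zkey y) = false) :
    PySem.List.insertBy (fun a b => decide (zkey a < zkey b)) x l = l ++ [x] := by
  induction l with
  | nil => simp [PySem.List.insertBy]
  | cons b bs ih =>
      have hb := h b (by simp)
      simp only [PySem.List.insertBy, hb, Bool.false_eq_true, if_neg, not_false_iff,
        List.cons_append, List.cons.injEq, true_and]
      exact ih (fun y hy => h y (by simp [hy]))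

-- stable insertion with a boolean key into an already-partitioned accumulator
theorem insertBy_partition (x : List Int) (A B : List (List Int))
    (hA : ∀ y ∈ A, zkey y = false) (hB : ∀ y ∈ B, zkey y = true) :
    PySem.List.insertBy (fun a b => decide (zkey a < zkey b)) x (A ++ B) =
      if zkey x then A ++ B ++ [x] else A ++ [x] ++ B := by
  cases hx : zkey x with
  | true =>
      rw [List.append_assoc, ← List.append_assoc]
      apply insertBy_all_not
      intro y _
      cases hy : zkey y <;> simp [hx]
  | false =>
      simp only [Bool.false_eq_true, if_neg, not_false_iff]
      induction A with
      | nil =>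
          cases B with
          | nil => simp [PySem.List.insertBy]
          | cons b bs =>
              have hb : zkey b = true := hB b (by simp)
              simp [PySem.List.insertBy, hx, hb]
      | cons a as ih =>
          have ha : zkey a = false := hA a (by simp)
          have hrec := ih (fun y hy => hA y (by simp [hy]))
          simp only [List.cons_append, PySem.List.insertBy, hx, ha]
          simp only [show decide ((false : Bool) < false) = false from rfl,
            Bool.false_eq_true, if_neg, not_false_iff]
          rw [hrec]

-- the insertion-sort fold keeps the accumulator partitioned
theorem foldl_insertBy_partition (xs : List (List Int)) (A B : List (List Int))
    (hA : ∀ y ∈ A, zkey y = false) (hB : ∀ y ∈ B, zkey y = true) :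
    xs.foldl (fun acc x => PySem.List.insertBy (fun a b => decide (zkey a < zkey b)) x acc) (A ++ B) =
      (A ++ xs.filter (fun r => !zkey r)) ++ (B ++ xs.filter (fun r => zkey r)) := by
  induction xs generalizing A B with
  | nil => simp
  | cons x xs ih =>
      simp only [List.foldl_cons]
      rw [insertBy_partition x A B hA hB]
      cases hx : zkey x with
      | true =>
          rw [if_pos rfl]
          have := ih A (B ++ [x]) hA (by
            intro y hy
            rcases List.mem_append.mp hy with hmem | hmem
            · exact hB y hmem
            · simp at hmem; subst hmem; exact hx)
          rw [← List.append_assoc] at this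
          rw [this]
          simp [hx, List.append_assoc]
      | false =>
          rw [if_neg (by simp)]
          have := ih (A ++ [x]) B (by
            intro y hy
            rcases List.mem_append.mp hy with hmem | hmem
            · exact hA y hmem
            · simp at hmem; subst hmem; exact hx) hB
          rw [← List.append_assoc] at this
          rw [this]
          simp [hx, List.append_assoc]

theorem sorted_bool_key (ss : List (List Int)) :
    PySem.List.sorted ss zkey false =
      ss.filter (fun r => !zkey r) ++ ss.filter (fun r => zkey r) := by
  have := foldl_insertBy_partition ss [] [] (by simp) (by simp)
  simpa [PySem.List.sorted] using this

-- ===== VERDICT (by name: the statement is the Claim_ definition above) =====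
theorem zero_below_spec : Claim_equal_zero_below := by
  intro ss _
  unfold Spec_zero_below zero_below zero_below_alt
  rw [zbLoop_eq ss 0 [] (by simp)]
  show _ = PySem.List.sorted ss zkey false
  rw [sorted_bool_key]
  simp
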